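-- pv_equiv track=rewrite | github.com/Le-Nom-du-Pere/MINIMINIMOON | document_segmenter.py | _create_char_distribution
-- ===== SOURCE A (Python) =====
-- from typing import (
--     Any,
--     Callable,
--     Dict,
--     Generator,
--     Iterable,
--     List,
--     Optional,
--     Set,
--     Tuple,
--     Union,
-- )
--
-- def _create_char_distribution(char_lengths: List[int]) -> Dict[str, int]:
--     """Create character length distribution buckets for analysis"""
--     distribution = {
--         "< 500": 0,
--         "500-699": 0,
--         "700-900 (target)": 0,
--         "> 900": 0
--     }
--
--     for length in char_lengths:
--         if length < 500:
--             distribution["< 500"] += 1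
--         elif length < 700:
--             distribution["500-699"] += 1
--         elif length <= 900:
--             distribution["700-900 (target)"] += 1
--         else:
--             distribution["> 900"] += 1
--
--     return distribution
-- ===== SOURCE B (Python) =====
-- def _create_char_distribution(char_lengths):
--     """Create character length distribution buckets for analysis"""
--     return {
--         "< 500": sum(1 for n in char_lengths if n < 500),
--         "500-699": sum(1 for n in char_lengths if 500 <= n < 700),
--         "700-900 (target)": sum(1 for n in char_lengths if 700 <= n <= 900),
--         "> 900": sum(1 for n in char_lengths if n > 900),
--     }
-- ===== Notes on version B (the rewrite author's own statement) =====
-- stated objective: idiomatic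
-- what changed: Replaces the mutating single-pass if/elif cascade over a pre-initialised dict with a declarative dict literal of four independent filtered counts (one sum-of-generator per bucket).
import Mathlib
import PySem

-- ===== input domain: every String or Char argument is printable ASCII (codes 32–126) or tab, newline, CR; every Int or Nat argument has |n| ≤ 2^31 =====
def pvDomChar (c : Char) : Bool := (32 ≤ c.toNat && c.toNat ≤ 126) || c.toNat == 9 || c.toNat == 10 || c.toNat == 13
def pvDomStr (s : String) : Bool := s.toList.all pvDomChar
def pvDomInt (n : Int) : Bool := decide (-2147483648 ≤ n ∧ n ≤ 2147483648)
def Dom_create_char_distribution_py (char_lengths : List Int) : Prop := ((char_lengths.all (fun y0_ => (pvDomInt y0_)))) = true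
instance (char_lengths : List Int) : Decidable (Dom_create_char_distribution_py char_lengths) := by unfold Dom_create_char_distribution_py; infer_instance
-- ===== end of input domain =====

-- B replaces A's mutating if/elif cascade over a pre-initialised dict with a dict literal of four independent filtered counts (idiomatic; same O(n) cost).

-- ===== PORT A =====
-- per-element update of A's for-loop body (d[k] += 1 on an existing key = modify with default)
def pvStepA (d : PySem.Dict String Int) (length : Int) : PySem.Dict String Int :=
  if length < 500 then d.modify "< 500" 0 (· + 1)
  else if length < 700 then d.modify "500-699" 0 (· + 1)
  else if length ≤ 900 then d.modify "700-900 (target)" 0 (· + 1)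
  else d.modify "> 900" 0 (· + 1)

def create_char_distribution_py (char_lengths : List Int) : List (String × Int) :=
  let distribution : PySem.Dict String Int :=
    PySem.Dict.ofList [("< 500", 0), ("500-699", 0), ("700-900 (target)", 0), ("> 900", 0)]
  (char_lengths.foldl pvStepA distribution).items

-- ===== PORT B =====
def create_char_distribution_py_alt (char_lengths : List Int) : List (String × Int) :=
  [("< 500", (char_lengths.countP (fun n => n < 500) : Int)),
   ("500-699", (char_lengths.countP (fun n => 500 ≤ n ∧ n < 700) : Int)),
   ("700-900 (target)", (char_lengths.countP (fun n => 700 ≤ n ∧ n ≤ 900) : Int)),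
   ("> 900", (char_lengths.countP (fun n => 900 < n) : Int))]

-- ===== PRECONDITION & SPEC =====
def Spec_create_char_distribution_py (char_lengths : List Int) (out : List (String × Int)) : Prop := out = create_char_distribution_py_alt char_lengths
instance (char_lengths : List Int) (out : List (String × Int)) : Decidable (Spec_create_char_distribution_py char_lengths out) := by unfold Spec_create_char_distribution_py; infer_instance

-- ===== CLAIM (what is proved, stated in full; the proofs are below) =====
def Claim_equal_create_char_distribution_py : Prop := ∀ (char_lengths : List Int), Dom_create_char_distribution_py char_lengths → Spec_create_char_distribution_py char_lengths (create_char_distribution_py char_lengths)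

-- ===== LEMMAS AND PROOFS =====
-- invariant of A's loop, with the four current counter values generalised
theorem pvFoldA_items (xs : List Int) : ∀ (c0 c1 c2 c3 : Int),
    (xs.foldl pvStepA (PySem.Dict.mk [("< 500", c0), ("500-699", c1), ("700-900 (target)", c2), ("> 900", c3)])).items
    = [("< 500", c0 + (xs.countP (fun n => n < 500) : Int)),
       ("500-699", c1 + (xs.countP (fun n => 500 ≤ n ∧ n < 700) : Int)),
       ("700-900 (target)", c2 + (xs.countP (fun n => 700 ≤ n ∧ n ≤ 900) : Int)),
       ("> 900", c3 + (xs.countP (fun n => 900 < n) : Int))] := by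
  induction xs with
  | nil => intro c0 c1 c2 c3; simp
  | cons x xs ih =>
    intro c0 c1 c2 c3
    simp only [List.foldl_cons, List.countP_cons]
    by_cases h0 : x < 500
    · have : pvStepA (PySem.Dict.mk [("< 500", c0), ("500-699", c1), ("700-900 (target)", c2), ("> 900", c3)]) x
          = PySem.Dict.mk [("< 500", c0 + 1), ("500-699", c1), ("700-900 (target)", c2), ("> 900", c3)] := by
        simp [pvStepA, h0, PySem.Dict.modify, PySem.Dict.getD, PySem.Dict.get?, PySem.Dict.insert]
      rw [this, ih]
      have hd : (decide (x < 500)) = true := by simpa using h0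
      simp [hd, show ¬(500 ≤ x ∧ x < 700) by omega, show ¬(700 ≤ x ∧ x ≤ 900) by omega,
            show ¬(900 < x) by omega]
      omega
    · by_cases h1 : x < 700
      · have : pvStepA (PySem.Dict.mk [("< 500", c0), ("500-699", c1), ("700-900 (target)", c2), ("> 900", c3)]) x
            = PySem.Dict.mk [("< 500", c0), ("500-699", c1 + 1), ("700-900 (target)", c2), ("> 900", c3)] := by
          simp [pvStepA, h0, h1, PySem.Dict.modify, PySem.Dict.getD, PySem.Dict.get?, PySem.Dict.insert]
        rw [this, ih]
        simp [show ¬ x < 500 from h0, show (500 ≤ x ∧ x < 700) by omega,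
              show ¬(700 ≤ x ∧ x ≤ 900) by omega, show ¬(900 < x) by omega]
        omega
      · by_cases h2 : x ≤ 900
        · have : pvStepA (PySem.Dict.mk [("< 500", c0), ("500-699", c1), ("700-900 (target)", c2), ("> 900", c3)]) x
              = PySem.Dict.mk [("< 500", c0), ("500-699", c1), ("700-900 (target)", c2 + 1), ("> 900", c3)] := by
            simp [pvStepA, h0, h1, h2, PySem.Dict.modify, PySem.Dict.getD, PySem.Dict.get?, PySem.Dict.insert]
          rw [this, ih]
          simp [show ¬ x < 500 from h0, show ¬(500 ≤ x ∧ x < 700) by omega,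
                show (700 ≤ x ∧ x ≤ 900) by omega, show ¬(900 < x) by omega]
          omega
        · have : pvStepA (PySem.Dict.mk [("< 500", c0), ("500-699", c1), ("700-900 (target)", c2), ("> 900", c3)]) x
              = PySem.Dict.mk [("< 500", c0), ("500-699", c1), ("700-900 (target)", c2), ("> 900", c3 + 1)] := by
            simp [pvStepA, h0, h1, h2, PySem.Dict.modify, PySem.Dict.getD, PySem.Dict.get?, PySem.Dict.insert]
          rw [this, ih]
          simp [show ¬ x < 500 from h0, show ¬(500 ≤ x ∧ x < 700) by omega,
                show ¬(700 ≤ x ∧ x ≤ 900) by omega, show (900 < x) by omega]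
          omega

-- ===== VERDICT (by name: the statement is the Claim_ definition above) =====
theorem create_char_distribution_py_spec : Claim_equal_create_char_distribution_py := by
  intro xs _
  show create_char_distribution_py xs = create_char_distribution_py_alt xs
  simp only [create_char_distribution_py, PySem.Dict.ofList]
  rw [show PySem.Dict.update PySem.Dict.empty [("< 500", 0), ("500-699", 0), ("700-900 (target)", 0), ("> 900", 0)]
      = PySem.Dict.mk [("< 500", (0:Int)), ("500-699", 0), ("700-900 (target)", 0), ("> 900", 0)] from rfl]
  rw [pvFoldA_items]
  simp [create_char_distribution_py_alt]
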